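-- pv_equiv track=rewrite | github.com/gabriel-v/chicago-crime-search | py_index/search_demo/tabs/manticore_autocomplete_tab.py | combine_autocomplete_results
-- ===== SOURCE A (Python) =====
-- def combine_autocomplete_results(data):
--     data = data[::-1]
--     values = [d[1] for d in data]
--     present = set()
--     final = []
--     maxlen = max(len(v) for v in values) if values else 0
--     for i in range(maxlen):
--         for v in values:
--             if i < len(v):
--                 if v[i] not in present:
--                     present.add(v[i])
--                     final.append(v[i])
--                     if len(final) > 100:
--                         return final
--     return final
-- ===== SOURCE B (Python) =====
-- def combine_autocomplete_results(data):
--     # Build the whole column-major interleaving first (peel heads off the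
--     # reversed value lists round by round), then dedup keeping first
--     # occurrences and cap at 101 results (A returns when len > 100).
--     lists = [d[1] for d in reversed(data) if d[1]]
--     seq = []
--     while lists:
--         seq.extend(l[0] for l in lists)
--         lists = [l[1:] for l in lists if len(l) > 1]
--     return list(dict.fromkeys(seq))[:101]
-- ===== Notes on version B (the rewrite author's own statement) =====
-- stated objective: simpler
-- what changed: Replaces A's range(maxlen) index loop with inline set-dedup and an early return by a build-then-dedup decomposition: peel the heads off the reversed value lists round by round to build the whole column-major interleaving, then dedup keeping first occurrences via dict.fromkeys and slice [:101] (A's cap of 101 items).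
import Mathlib
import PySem

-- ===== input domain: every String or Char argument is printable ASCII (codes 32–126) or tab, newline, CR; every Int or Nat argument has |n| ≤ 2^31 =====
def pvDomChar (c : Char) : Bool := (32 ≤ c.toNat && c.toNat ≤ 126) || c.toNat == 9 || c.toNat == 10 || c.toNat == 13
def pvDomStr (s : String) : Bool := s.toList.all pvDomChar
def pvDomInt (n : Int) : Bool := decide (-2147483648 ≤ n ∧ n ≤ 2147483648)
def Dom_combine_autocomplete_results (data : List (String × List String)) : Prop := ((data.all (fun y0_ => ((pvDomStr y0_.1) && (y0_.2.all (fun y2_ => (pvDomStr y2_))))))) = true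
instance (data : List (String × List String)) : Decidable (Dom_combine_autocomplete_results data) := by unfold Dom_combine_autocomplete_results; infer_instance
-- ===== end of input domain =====

-- B builds the whole column-major interleaving first and dedups/caps afterwards,
-- instead of A's index loop with inline set dedup and early return (objective: simpler).

-- ===== PORT A =====
-- Literal port of A: reverse data, loop i over range(maxlen), inner loop over the
-- value lists, inline set dedup; the early `return` (len(final) > 100) is modelled
-- by a `done` flag that freezes the state (an early-returned loop never changes it).
def combine_autocomplete_results (data : List (String × List String)) : List String :=
  let dataR := data.reverse                                -- data[::-1]
  let values := dataR.map (fun d => d.2)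
  -- max(len(v) for v in values) if values else 0; foldl max 0 is exact (lengths ≥ 0)
  let maxlen := if values.isEmpty then 0 else (values.map List.length).foldl max 0
  let st := (List.range maxlen).foldl (fun st i =>
      values.foldl (fun st v =>
        if h : i < v.length then                           -- if i < len(v):
          if st.2.2 then st                                -- (already returned)
          else if PySem.Set.contains st.1 v[i] then st     -- if v[i] not in present:
          else (PySem.Set.add st.1 v[i], st.2.1 ++ [v[i]],
                decide (100 < (st.2.1 ++ [v[i]]).length))  -- return when len > 100
        else st) st)
    ((PySem.Set.empty : PySem.Set String), ([] : List String), false)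
  st.2.1

-- ===== PORT B =====
-- one round of the while loop: lists = [l[1:] for l in lists if len(l) > 1]
def peelStep (lists : List (List String)) : List (List String) :=
  (lists.filter (fun l => decide (1 < l.length))).map (fun l => l.drop 1)

-- termination helper for peelLoop (cited in its decreasing_by)
theorem pvPeelMeasureLe (lists : List (List String)) :
    ((peelStep lists).map List.length).sum + (peelStep lists).length
      ≤ (lists.map List.length).sum := by
  induction lists with
  | nil => simp [peelStep]
  | cons l ls ih =>
    by_cases h : 1 < l.length <;> simp [peelStep, h] at ih ⊢ <;> omega

-- while lists: seq.extend(l[0] for l in lists); lists = peelStep lists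
-- (l[0] is ported as headD ""; peelLoop is only called on lists of nonempty lists)
def peelLoop (lists : List (List String)) (seq : List String) : List String :=
  if lists = [] then seq
  else peelLoop (peelStep lists) (seq ++ lists.map (fun l => l.headD ""))
termination_by (lists.map List.length).sum + lists.length
decreasing_by
  have h1 := pvPeelMeasureLe lists
  have h2 : 1 ≤ lists.length := by
    cases lists with
    | nil => simp_all
    | cons a b => simp
  omega

def combine_autocomplete_results_alt (data : List (String × List String)) : List String :=
  let lists := (data.reverse.map (fun d => d.2)).filter (fun l => !l.isEmpty)  -- [d[1] for d in reversed(data) if d[1]]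
  let seq := peelLoop lists []
  (PySem.List.dedup seq).take 101                          -- list(dict.fromkeys(seq))[:101]

-- ===== PRECONDITION & SPEC =====
def Spec_combine_autocomplete_results (data : List (String × List String)) (out : List String) : Prop := out = combine_autocomplete_results_alt data
instance (data : List (String × List String)) (out : List String) : Decidable (Spec_combine_autocomplete_results data out) := by unfold Spec_combine_autocomplete_results; infer_instance

-- ===== CLAIM (what is proved, stated in full; the proofs are below) =====
def Claim_equal_combine_autocomplete_results : Prop := ∀ (data : List (String × List String)), Dom_combine_autocomplete_results data → Spec_combine_autocomplete_results data (combine_autocomplete_results data)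

-- ===== LEMMAS AND PROOFS =====

-- A's loop body, as a step function on the (present, final, done) state
def pvStepA (st : PySem.Set String × List String × Bool) (x : String) :
    PySem.Set String × List String × Bool :=
  if st.2.2 then st
  else if PySem.Set.contains st.1 x then st
  else (PySem.Set.add st.1 x, st.2.1 ++ [x], decide (100 < (st.2.1 ++ [x]).length))

-- the column-major interleaving of the first n columns
def pvColSeq (n : Nat) (vs : List (List String)) : List String :=
  (List.range n).flatMap (fun i => vs.filterMap (fun v => v[i]?))

-- A's nested loops are a fold of pvStepA over the column-major sequence
theorem pvFoldA (values : List (List String)) (n : Nat)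
    (init : PySem.Set String × List String × Bool) :
    (List.range n).foldl (fun st i =>
      values.foldl (fun st v =>
        if h : i < v.length then
          if st.2.2 then st
          else if PySem.Set.contains st.1 v[i] then st
          else (PySem.Set.add st.1 v[i], st.2.1 ++ [v[i]],
                decide (100 < (st.2.1 ++ [v[i]]).length))
        else st) st) init
    = (pvColSeq n values).foldl pvStepA init := by
  rw [pvColSeq, List.foldl_flatMap]
  refine List.foldl_ext _ _ _ (fun st i _ => ?_)
  rw [List.foldl_filterMap]
  refine List.foldl_ext _ _ _ (fun st v _ => ?_)
  by_cases h : i < v.length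
  · simp [h, pvStepA]
  · simp [h]

-- once done, the fold is frozen
theorem pvDoneAbsorb (xs : List String) (s : PySem.Set String) (f : List String) :
    xs.foldl pvStepA (s, f, true) = (s, f, true) := by
  induction xs with
  | nil => rfl
  | cons x xs ih => simpa [pvStepA] using ih

theorem pvOfListSnoc (p : List String) (x : String) :
    PySem.Set.ofList (p ++ [x]) = PySem.Set.add (PySem.Set.ofList p) x := by
  rw [PySem.Set.ofList_eq_foldl, PySem.Set.ofList_eq_foldl, List.foldl_append]
  rfl

theorem pvAddMem (p : List String) (x : String) (hx : x ∈ p) :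
    PySem.Set.add (PySem.Set.ofList p) x = PySem.Set.ofList p := by
  simp [PySem.Set.add, hx]

theorem pvAddNotMem (p : List String) (x : String) (hx : x ∉ p) :
    PySem.Set.add (PySem.Set.ofList p) x = PySem.Set.ofList p ++ [x] := by
  simp [PySem.Set.add, hx]

-- ofList is monotone in the prefix order
theorem pvOfListPrefix (q p : List String) :
    ∃ t, PySem.Set.ofList (p ++ q) = PySem.Set.ofList p ++ t := by
  induction q generalizing p with
  | nil => exact ⟨[], by simp⟩
  | cons x q ih =>
    obtain ⟨t, ht⟩ := ih (p ++ [x])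
    rw [show p ++ x :: q = (p ++ [x]) ++ q by simp] at *
    rw [ht, pvOfListSnoc]
    by_cases hx : x ∈ p
    · exact ⟨t, by rw [pvAddMem p x hx]⟩
    · exact ⟨[x] ++ t, by rw [pvAddNotMem p x hx, List.append_assoc]⟩

-- main invariant for A's loop: the final list is the capped ordered dedup
theorem pvLoopA (xs : List String) : ∀ (p : List String),
    (PySem.Set.ofList p).length ≤ 100 →
    (xs.foldl pvStepA (PySem.Set.ofList p, PySem.Set.ofList p, false)).2.1
      = (PySem.Set.ofList (p ++ xs)).take 101 := by
  induction xs with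
  | nil =>
    intro p hp
    simp [List.take_of_length_le (by omega : (PySem.Set.ofList p).length ≤ 101)]
  | cons x xs ih =>
    intro p hp
    rw [List.foldl_cons]
    by_cases hx : x ∈ p
    · have hadd : PySem.Set.ofList (p ++ [x]) = PySem.Set.ofList p := by
        rw [pvOfListSnoc, pvAddMem p x hx]
      have hstep : pvStepA (PySem.Set.ofList p, PySem.Set.ofList p, false) x
          = (PySem.Set.ofList p, PySem.Set.ofList p, false) := by
        simp [pvStepA, hx]
      have key : PySem.Set.ofList (p ++ x :: xs) = PySem.Set.ofList (p ++ xs) := by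
        rw [show p ++ x :: xs = (p ++ [x]) ++ xs by simp,
            PySem.Set.ofList_eq_foldl ((p ++ [x]) ++ xs), List.foldl_append,
            ← PySem.Set.ofList_eq_foldl, hadd,
            PySem.Set.ofList_eq_foldl (p ++ xs), List.foldl_append,
            ← PySem.Set.ofList_eq_foldl]
      rw [hstep, ih p hp, key]
    · have hadd : PySem.Set.ofList (p ++ [x]) = PySem.Set.ofList p ++ [x] := by
        rw [pvOfListSnoc, pvAddNotMem p x hx]
      have hstep : pvStepA (PySem.Set.ofList p, PySem.Set.ofList p, false) x
          = (PySem.Set.ofList (p ++ [x]), PySem.Set.ofList (p ++ [x]),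
             decide (100 < (PySem.Set.ofList p ++ [x]).length)) := by
        simp [pvStepA, hx, hadd]
      rw [hstep]
      by_cases hL : (PySem.Set.ofList p).length < 100
      · have hflag : decide (100 < (PySem.Set.ofList p ++ [x]).length) = false := by
          simp; omega
        rw [hflag]
        have := ih (p ++ [x]) (by rw [hadd]; simp; omega)
        rw [this, show (p ++ [x]) ++ xs = p ++ x :: xs by simp]
      · -- the 101st distinct element: A returns here; the rest of the fold is frozen
        have hflag : decide (100 < (PySem.Set.ofList p ++ [x]).length) = true := by
          simp; omega
        rw [hflag, pvDoneAbsorb]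
        obtain ⟨t, ht⟩ := pvOfListPrefix xs (p ++ [x])
        rw [show p ++ x :: xs = (p ++ [x]) ++ xs by simp, ht, hadd]
        have hlen : (PySem.Set.ofList p ++ [x]).length = 101 := by simp; omega
        show PySem.Set.ofList p ++ [x] = _
        rw [← hlen, List.take_left]

-- column 0 of nonempty lists is the list of heads
theorem pvColZero (lists : List (List String)) (h : ∀ l ∈ lists, l ≠ []) :
    lists.filterMap (fun v => v[0]?) = lists.map (fun l => l.headD "") := by
  induction lists with
  | nil => rfl
  | cons l ls ih =>
    cases l with
    | nil => exact absurd rfl (h _ (by simp))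
    | cons a as => simp [ih (fun l hl => h l (by simp [hl]))]

-- column i+1 equals column i of the peeled lists
theorem pvColShift (lists : List (List String)) (i : Nat) :
    lists.filterMap (fun v => v[i + 1]?)
      = (peelStep lists).filterMap (fun v => v[i]?) := by
  induction lists with
  | nil => rfl
  | cons l ls ih =>
    by_cases h : 1 < l.length
    · simp only [peelStep, List.filterMap_cons, List.filter_cons, h, decide_true, if_true,
        List.map_cons, List.getElem?_drop]
      simp only [peelStep] at ih
      rw [show 1 + i = i + 1 by omega, ih]
    · have hnone : l[i + 1]? = none := List.getElem?_eq_none (by omega)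
      simp only [peelStep, List.filterMap_cons, hnone, List.filter_cons, h, decide_false]
      simpa [peelStep] using ih

-- peeling one round peels off column 0
theorem pvColSeqSucc (n : Nat) (lists : List (List String)) (h : ∀ l ∈ lists, l ≠ []) :
    pvColSeq (n + 1) lists
      = lists.map (fun l => l.headD "") ++ pvColSeq n (peelStep lists) := by
  unfold pvColSeq
  rw [List.range_succ_eq_map, List.flatMap_cons, List.flatMap_map]
  congr 1
  · exact pvColZero lists h
  · exact List.flatMap_congr (fun i _ => pvColShift lists i)

-- the peel loop produces the column-major interleaving
theorem pvPeelEq (n : Nat) : ∀ (lists : List (List String)) (seq : List String),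
    (∀ l ∈ lists, l ≠ [] ∧ l.length ≤ n) →
    peelLoop lists seq = seq ++ pvColSeq n lists := by
  induction n with
  | zero =>
    intro lists seq h
    cases lists with
    | nil => rw [peelLoop]; simp [pvColSeq]
    | cons l ls =>
      obtain ⟨hne, hlen⟩ := h l (by simp)
      cases l with
      | nil => exact absurd rfl hne
      | cons a as => simp at hlen
  | succ n ih =>
    intro lists seq h
    by_cases hnil : lists = []
    · subst hnil; rw [peelLoop]; simp [pvColSeq]
    · rw [peelLoop, if_neg hnil]
      rw [ih _ _ (fun l hl => ?_), List.append_assoc,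
        ← pvColSeqSucc n lists (fun l hl => (h l hl).1)]
      · simp only [peelStep, List.mem_map, List.mem_filter] at hl
        obtain ⟨l', ⟨hl', hlen'⟩, rfl⟩ := hl
        simp only [decide_eq_true_eq] at hlen'
        have hle := (h l' hl').2
        refine ⟨?_, by simp; omega⟩
        intro hcontra
        have : (l'.drop 1).length = 0 := by rw [hcontra]; rfl
        simp at this
        omega

-- empty value lists contribute nothing to any column
theorem pvColFilter (n : Nat) (values : List (List String)) :
    pvColSeq n values = pvColSeq n (values.filter (fun l => !l.isEmpty)) := by
  unfold pvColSeq
  refine List.flatMap_congr (fun i _ => ?_)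
  induction values with
  | nil => rfl
  | cons l ls ih =>
    cases l with
    | nil => simpa using ih
    | cons a as =>
      simp only [List.filter_cons, List.isEmpty_cons, Bool.not_false, if_true,
        List.filterMap_cons]
      rw [ih]

-- ===== VERDICT (by name: the statement is the Claim_ definition above) =====
theorem combine_autocomplete_results_spec : Claim_equal_combine_autocomplete_results := by
  intro data _
  unfold Spec_combine_autocomplete_results
  show combine_autocomplete_results data = combine_autocomplete_results_alt data
  rw [combine_autocomplete_results, combine_autocomplete_results_alt]
  set values := data.reverse.map (fun d => d.2) with hv
  set maxlen := (if values.isEmpty then 0 else (values.map List.length).foldl max 0 : Nat)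
    with hm
  -- A's side: fold over the column-major sequence, then the loop invariant at p = []
  rw [pvFoldA values maxlen]
  have hA := pvLoopA (pvColSeq maxlen values) []
    (by simp [PySem.Set.ofList_eq_foldl])
  simp only [List.nil_append] at hA
  rw [show ((PySem.Set.empty : PySem.Set String), ([] : List String), false)
        = (PySem.Set.ofList [], PySem.Set.ofList [], false) from rfl, hA]
  -- B's side: the peel loop is exactly the same column-major sequence
  rw [PySem.List.dedup_eq_ofList]
  congr 1
  rw [pvPeelEq maxlen _ [] ?_, List.nil_append, ← pvColFilter]
  intro l hl
  have hmem : l ∈ values := List.mem_of_mem_filter hl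
  have hne : l ≠ [] := by
    have := List.of_mem_filter hl
    simpa [List.isEmpty_iff] using this
  refine ⟨hne, ?_⟩
  have hnotempty : values.isEmpty = false := by
    cases hvv : values with
    | nil => rw [hvv] at hmem; simp at hmem
    | cons a b => rfl
  rw [hm, if_neg (by simp [hnotempty])]
  exact ((PySem.List.le_foldl_max (values.map List.length) 0).2 l.length
    (List.mem_map_of_mem hmem))
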